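-- pv_equiv track=rewrite | github.com/shimonpozd/astra | brain_old/deep_research/orchestrator_old.py | select_priority_links
-- ===== SOURCE A (Python) =====
-- from typing import Any, Dict, List, Optional, Set, Tuple
--
-- def select_priority_links(
--     links: List[Dict[str, Any]],
--     allowed_categories: List[str],
--     max_results: int,
--     priority_commentators: List[str],
-- ) -> List[Dict[str, Any]]:
--     if not links or max_results <= 0:
--         return []
--
--     allowed_set = set(allowed_categories) if allowed_categories else set()
--     selected: List[Dict[str, Any]] = []
--     seen_refs: set[str] = set()
--
--     def add_link(link: Dict[str, Any]) -> None:
--         if len(selected) >= max_results: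
--             return
--         ref = link.get("ref")
--         if not ref or ref in seen_refs:
--             return
--         if allowed_set and link.get("category") not in allowed_set:
--             return
--         selected.append(link)
--         seen_refs.add(ref)
--
--     for commentator in priority_commentators:
--         for link in links:
--             if len(selected) >= max_results:
--                 break
--             if link.get("commentator") == commentator:
--                 add_link(link)
--         if len(selected) >= max_results:
--             break
--
--     if len(selected) < max_results:
--         for link in links:
--             if len(selected) >= max_results:
--                 break
--             add_link(link)
--
--     return selected
-- ===== SOURCE B (Python) =====
-- from typing import Any, Dict, List
--
-- def select_priority_links(
--     links: List[Dict[str, Any]],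
--     allowed_categories: List[str],
--     max_results: int,
--     priority_commentators: List[str],
-- ) -> List[Dict[str, Any]]:
--     if not links or max_results <= 0:
--         return []
--
--     allowed = set(allowed_categories)
--
--     # Index links by commentator once, preserving order of appearance.
--     groups: Dict[Any, List[Dict[str, Any]]] = {}
--     for link in links:
--         groups.setdefault(link.get("commentator"), []).append(link)
--
--     # Priority candidates (each priority commentator's group, in order),
--     # followed by all links as the fallback; one capped dedup pass over that stream.
--     candidates = [l for c in priority_commentators for l in groups.get(c, [])] + links
--
--     selected: List[Dict[str, Any]] = []
--     seen: set = set()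
--     for link in candidates:
--         if len(selected) >= max_results:
--             break
--         ref = link.get("ref")
--         if not ref or ref in seen:
--             continue
--         if allowed and link.get("category") not in allowed:
--             continue
--         selected.append(link)
--         seen.add(ref)
--     return selected
-- ===== Notes on version B (the rewrite author's own statement) =====
-- stated objective: faster
-- what changed: B indexes links by commentator in one dict pass, builds one candidate stream (priority groups then all links) and selects in a single capped dedup pass, instead of A's rescan of the whole link list per priority commentator with a separate fallback phase.
import Mathlib
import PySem

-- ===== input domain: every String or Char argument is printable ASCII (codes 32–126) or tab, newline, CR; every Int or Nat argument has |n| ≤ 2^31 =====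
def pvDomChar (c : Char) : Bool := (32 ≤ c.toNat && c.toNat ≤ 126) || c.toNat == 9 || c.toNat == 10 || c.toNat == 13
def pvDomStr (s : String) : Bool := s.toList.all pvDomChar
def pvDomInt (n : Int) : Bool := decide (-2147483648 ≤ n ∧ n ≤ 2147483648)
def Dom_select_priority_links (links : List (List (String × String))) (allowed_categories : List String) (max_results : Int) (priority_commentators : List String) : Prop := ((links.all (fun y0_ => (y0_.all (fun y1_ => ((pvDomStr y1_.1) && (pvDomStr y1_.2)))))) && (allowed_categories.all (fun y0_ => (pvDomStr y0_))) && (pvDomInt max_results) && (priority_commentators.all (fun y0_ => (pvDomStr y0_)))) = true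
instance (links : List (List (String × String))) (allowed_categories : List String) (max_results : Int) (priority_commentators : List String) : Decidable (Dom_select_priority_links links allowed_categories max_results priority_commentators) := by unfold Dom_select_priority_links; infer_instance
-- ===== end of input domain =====

-- B indexes links by commentator once and runs ONE capped dedup pass over a single
-- candidate stream (priority groups, then all links); objective: faster (no rescan per commentator).

-- ===== PORT A =====
-- link.get(k) on a dict ported as association list = first-match lookup
def pvAGet (link : List (String × String)) (k : String) : Option String :=
  (PySem.Dict.mk link).get? k

-- A's add_link(link); state = (selected, seen_refs)
def pvAAdd (allowed_categories : List String) (max_results : Int)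
    (s : List (List (String × String)) × PySem.Set String) (link : List (String × String)) :
    List (List (String × String)) × PySem.Set String :=
  if (s.1.length : Int) ≥ max_results then s
  else match pvAGet link "ref" with
    | none => s
    | some r =>
      if r = "" then s
      else if PySem.Set.contains s.2 r then s
      else if !allowed_categories.isEmpty &&
              !(match pvAGet link "category" with
                | some c => allowed_categories.contains c
                | none => false) then s
      else (s.1 ++ [link], PySem.Set.add s.2 r)

-- 'break' on a full selection is modelled by the step returning the state unchanged
-- once len(selected) ≥ max_results (the skipped iterations would not change it).
def select_priority_links (links : List (List (String × String))) (allowed_categories : List String) (max_results : Int) (priority_commentators : List String) : List (List (String × String)) :=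
  if links = [] ∨ max_results ≤ 0 then []
  else
    let s0 : List (List (String × String)) × PySem.Set String := ([], PySem.Set.empty)
    let s1 := priority_commentators.foldl (fun s commentator =>
      links.foldl (fun s link =>
        if (s.1.length : Int) ≥ max_results then s
        else if pvAGet link "commentator" = some commentator then
          pvAAdd allowed_categories max_results s link
        else s) s) s0
    let s2 :=
      if (s1.1.length : Int) < max_results then
        links.foldl (fun s link =>
          if (s.1.length : Int) ≥ max_results then s
          else pvAAdd allowed_categories max_results s link) s1
      else s1
    s2.1

-- ===== PORT B =====
def pvBGet (k : String) (link : List (String × String)) : Option String :=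
  (PySem.Dict.mk link).get? k

-- groups.setdefault(link.get("commentator"), []).append(link); key may be None
def pvBGroups (links : List (List (String × String))) :
    PySem.Dict (Option String) (List (List (String × String))) :=
  links.foldl (fun d link =>
      d.insert (pvBGet "commentator" link) (d.getD (pvBGet "commentator" link) [] ++ [link]))
    PySem.Dict.empty

-- 'allowed and link.get("category") not in allowed' is FALSE (link kept) iff this holds
def pvBAllowed (allowed_categories : List String) (link : List (String × String)) : Bool :=
  allowed_categories.isEmpty ||
    (match pvBGet "category" link with
     | some c => allowed_categories.contains c
     | none => false)

-- one iteration of B's single selection loop ('break' ~ identity once full, see A's note)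
def pvBStep (allowed_categories : List String) (max_results : Int)
    (s : List (List (String × String)) × PySem.Set String) (link : List (String × String)) :
    List (List (String × String)) × PySem.Set String :=
  if max_results ≤ (s.1.length : Int) then s
  else match pvBGet "ref" link with
    | none => s
    | some r =>
      if r = "" ∨ PySem.Set.contains s.2 r then s
      else if pvBAllowed allowed_categories link then (s.1 ++ [link], PySem.Set.add s.2 r)
      else s

def select_priority_links_alt (links : List (List (String × String))) (allowed_categories : List String) (max_results : Int) (priority_commentators : List String) : List (List (String × String)) :=
  if links = [] ∨ max_results ≤ 0 then []
  else
    let groups := pvBGroups links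
    let candidates :=
      priority_commentators.flatMap (fun c => groups.getD (some c) []) ++ links
    (candidates.foldl (pvBStep allowed_categories max_results) ([], PySem.Set.empty)).1

-- ===== PRECONDITION & SPEC =====
def Spec_select_priority_links (links : List (List (String × String))) (allowed_categories : List String) (max_results : Int) (priority_commentators : List String) (out : List (List (String × String))) : Prop := out = select_priority_links_alt links allowed_categories max_results priority_commentators
instance (links : List (List (String × String))) (allowed_categories : List String) (max_results : Int) (priority_commentators : List String) (out : List (List (String × String))) : Decidable (Spec_select_priority_links links allowed_categories max_results priority_commentators out) := by unfold Spec_select_priority_links; infer_instance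

-- ===== CLAIM =====
def Claim_equal_select_priority_links : Prop := ∀ (links : List (List (String × String))) (allowed_categories : List String) (max_results : Int) (priority_commentators : List String), Dom_select_priority_links links allowed_categories max_results priority_commentators → Spec_select_priority_links links allowed_categories max_results priority_commentators (select_priority_links links allowed_categories max_results priority_commentators)

-- ===== LEMMAS AND PROOFS =====

-- A's step (full-check then add_link) and B's step agree pointwise
theorem pv_step_eq (ac : List String) (m : Int)
    (s : List (List (String × String)) × PySem.Set String) (link : List (String × String)) :
    (if (s.1.length : Int) ≥ m then s else pvAAdd ac m s link) = pvBStep ac m s link := by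
  unfold pvAAdd pvBStep pvBAllowed pvAGet pvBGet
  by_cases hf : m ≤ (s.1.length : Int)
  · simp [hf]
  · simp only [ge_iff_le, if_neg hf]
    cases (PySem.Dict.mk link).get? "ref" with
    | none => rfl
    | some r =>
      by_cases h1 : r = "" <;> by_cases h2 : PySem.Set.contains s.2 r = true <;>
        by_cases h3 : ac.isEmpty = true <;>
        cases hc : (PySem.Dict.mk link).get? "category" <;>
        simp [h1, h2, h3, hc]

-- a full state is a fixed point of B's whole loop
theorem pv_foldl_full (ac : List String) (m : Int) (links : List (List (String × String)))
    (s : List (List (String × String)) × PySem.Set String) (h : m ≤ (s.1.length : Int)) :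
    links.foldl (pvBStep ac m) s = s := by
  induction links with
  | nil => rfl
  | cons l t ih => simp only [List.foldl_cons, pvBStep, if_pos h]; exact ih

-- the group B's index stores under (some c) = the links whose "commentator" is c, in order
theorem pvBGroups_getD_aux (c : Option String) (links : List (List (String × String)))
    (d : PySem.Dict (Option String) (List (List (String × String)))) :
    (links.foldl (fun d link =>
      d.insert (pvBGet "commentator" link) (d.getD (pvBGet "commentator" link) [] ++ [link])) d).getD c [] =
      d.getD c [] ++ links.filter (fun link => pvBGet "commentator" link = c) := by
  induction links generalizing d with
  | nil => simp
  | cons link rest ih =>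
    simp only [List.foldl_cons, List.filter_cons]
    by_cases hc : pvBGet "commentator" link = c
    · rw [ih, PySem.Dict.getD_insert]
      simp [hc]
    · have h2 : ¬ c = pvBGet "commentator" link := fun h => hc h.symm
      rw [ih, PySem.Dict.getD_insert]
      simp [hc, h2]

theorem pvBGroups_getD (links : List (List (String × String))) (c : String) :
    (pvBGroups links).getD (some c) [] =
      links.filter (fun link => pvAGet link "commentator" = some c) := by
  unfold pvBGroups
  rw [pvBGroups_getD_aux]
  simp only [PySem.Dict.empty, PySem.Dict.getD, PySem.Dict.get?, List.nil_append]
  rfl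

-- A's inner priority scan over all links = B's step over the filtered group
theorem pv_inner_eq (links : List (List (String × String))) (ac : List String)
    (m : Int) (c : String) (s : List (List (String × String)) × PySem.Set String) :
    links.foldl (fun s link =>
        if (s.1.length : Int) ≥ m then s
        else if pvAGet link "commentator" = some c then pvAAdd ac m s link
        else s) s =
      (links.filter (fun link => pvAGet link "commentator" = some c)).foldl (pvBStep ac m) s := by
  rw [PySem.List.foldl_congr_mem
      (g := fun s link =>
        if pvAGet link "commentator" = some c then pvBStep ac m s link else s)]
  · exact PySem.List.foldl_ite_eq_foldl_filter
      (fun link => pvAGet link "commentator" = some c) (pvBStep ac m) links s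
  · intro s link _
    by_cases hf : (s.1.length : Int) ≥ m
    · by_cases hp : pvAGet link "commentator" = some c <;>
        simp [hf, hp, ← pv_step_eq]
    · by_cases hp : pvAGet link "commentator" = some c <;> simp [hf, hp, ← pv_step_eq]

-- ===== VERDICT =====
theorem select_priority_links_spec : Claim_equal_select_priority_links := by
  intro links ac m pcs _
  unfold Spec_select_priority_links select_priority_links select_priority_links_alt
  by_cases hg : links = [] ∨ m ≤ 0
  · simp [hg]
  · simp only [if_neg hg, List.foldl_append]
    have h1 : pcs.foldl (fun s commentator =>
        links.foldl (fun s link =>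
          if (s.1.length : Int) ≥ m then s
          else if pvAGet link "commentator" = some commentator then pvAAdd ac m s link
          else s) s) (([], PySem.Set.empty) : List (List (String × String)) × PySem.Set String) =
      (pcs.flatMap (fun c => (pvBGroups links).getD (some c) [])).foldl (pvBStep ac m)
        ([], PySem.Set.empty) := by
      rw [List.foldl_flatMap]
      apply PySem.List.foldl_congr_mem
      intro s c _
      rw [pv_inner_eq, pvBGroups_getD]
    rw [h1]
    set s1 := (pcs.flatMap (fun c => (pvBGroups links).getD (some c) [])).foldl (pvBStep ac m)
        ([], PySem.Set.empty) with hs1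
    by_cases hfull : (s1.1.length : Int) < m
    · have h2 : links.foldl (fun s link =>
          if (s.1.length : Int) ≥ m then s else pvAAdd ac m s link) s1 =
          links.foldl (pvBStep ac m) s1 := by
        apply PySem.List.foldl_congr_mem
        intro s link _
        exact pv_step_eq ac m s link
      simp [hfull, h2]
    · have hge : m ≤ (s1.1.length : Int) := by omega
      rw [pv_foldl_full ac m links s1 hge]
      simp [hfull]
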